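-- pv_equiv track=rewrite | github.com/srana6/Online-Social-Network-Analysis | a4/classify.py | label_tweets
-- ===== SOURCE A (Python) =====
-- def afinn_sentiment(terms, afinn, verbose=False):
--
--
--     pos = 0
--     neg = 0
--     for t in terms:
--         if t in afinn:
--             if afinn[t] > 0:
--                 pos += afinn[t]
--             else:
--                 neg += -1 * afinn[t]
--     return pos, neg
--
-- def label_tweets(tokens_list, tweets_list, afinn):
--
--     """ Label each tweet to pos/neg """
--     label = -1
--     y_label = []
--     for tokens in tokens_list:
--         pos, neg = afinn_sentiment(tokens, afinn)
--         if pos >= neg: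
--             label = 1
--         elif neg > pos:
--             label = 0
--         y_label.append(label)
--
--     return y_label
-- ===== SOURCE B (Python) =====
-- def label_tweets(tokens_list, tweets_list, afinn):
--     """ Label each tweet to pos/neg """
--     y_label = []
--     for tokens in tokens_list:
--         counts = {}
--         for t in tokens:
--             counts[t] = counts.get(t, 0) + 1
--         total = 0
--         for word, value in afinn.items():
--             total += value * counts.get(word, 0)
--         y_label.append(1 if total >= 0 else 0)
--     return y_label
-- ===== Notes on version B (the rewrite author's own statement) =====
-- stated objective: alternative
-- what changed: Inverts the traversal: instead of A's per-token dict lookups summed into two pos/neg accumulators, B builds a token-count dictionary per tweet and scans the AFINN lexicon once, accumulating value*count(word); label 1 iff the total is >= 0 (pos - neg equals that total).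
import Mathlib
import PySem

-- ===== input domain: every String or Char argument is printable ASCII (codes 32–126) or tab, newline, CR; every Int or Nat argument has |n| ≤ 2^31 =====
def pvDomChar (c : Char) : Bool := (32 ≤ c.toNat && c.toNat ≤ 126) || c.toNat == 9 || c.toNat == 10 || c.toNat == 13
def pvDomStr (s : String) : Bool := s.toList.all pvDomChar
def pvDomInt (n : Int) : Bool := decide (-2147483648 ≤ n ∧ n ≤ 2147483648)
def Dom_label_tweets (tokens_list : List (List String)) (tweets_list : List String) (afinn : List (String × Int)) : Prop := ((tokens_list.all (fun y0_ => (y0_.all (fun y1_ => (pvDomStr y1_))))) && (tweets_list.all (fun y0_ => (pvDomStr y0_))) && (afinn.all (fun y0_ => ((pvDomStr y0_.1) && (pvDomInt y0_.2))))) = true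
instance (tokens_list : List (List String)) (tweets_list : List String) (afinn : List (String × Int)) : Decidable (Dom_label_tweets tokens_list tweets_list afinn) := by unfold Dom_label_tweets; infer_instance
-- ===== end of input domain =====

-- B inverts the traversal: per tweet it builds a token-count dictionary and then scans the
-- AFINN lexicon once, accumulating value * count(word); label 1 iff the total is ≥ 0
-- (alternative decomposition; correct since pos - neg = Σ_word value·count(word)).

-- ===== PORT A =====
-- helper afinn_sentiment: two accumulators pos, neg over the token list
def afinn_sentimentA (terms : List String) (afinn : PySem.Dict String Int) : Int × Int :=
  terms.foldl
    (fun pn t =>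
      match afinn.get? t with          -- 'if t in afinn: … afinn[t] …'
      | some v => if v > 0 then (pn.1 + v, pn.2) else (pn.1, pn.2 + (-1) * v)
      | none => pn)
    (0, 0)

def label_tweets (tokens_list : List (List String)) (tweets_list : List String) (afinn : List (String × Int)) : List Int :=
  -- label = -1; y_label = []; for tokens in tokens_list: …
  (tokens_list.foldl
    (fun (st : Int × List Int) tokens =>
      let pn := afinn_sentimentA tokens (PySem.Dict.mk afinn)
      let label : Int := if pn.1 ≥ pn.2 then 1 else if pn.2 > pn.1 then 0 else st.1
      (label, st.2 ++ [label]))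
    (-1, [])).2

-- ===== PORT B =====
-- 'afinn.items()': the dict's item list — one pair per DISTINCT key, first occurrence wins
-- (the Python dict parameter has unique keys; this realises that view of the association list)
def lexGo : List (String × Int) → List String → List (String × Int)
  | [], _ => []
  | p :: rest, seen => if p.1 ∈ seen then lexGo rest seen else p :: lexGo rest (p.1 :: seen)

def lexItems (l : List (String × Int)) : List (String × Int) := lexGo l []

def label_tweets_alt (tokens_list : List (List String)) (tweets_list : List String) (afinn : List (String × Int)) : List Int :=
  (tokens_list.foldl
    (fun (acc : List Int) tokens =>
      -- counts = {}; for t in tokens: counts[t] = counts.get(t, 0) + 1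
      let counts := tokens.foldl (fun d t => d.insert t (d.getD t 0 + 1)) PySem.Dict.empty
      -- total = 0; for word, value in afinn.items(): total += value * counts.get(word, 0)
      let total : Int := (lexItems afinn).foldl (fun s p => s + p.2 * counts.getD p.1 0) 0
      acc ++ [if total ≥ 0 then (1 : Int) else 0])
    [])

-- ===== PRECONDITION & SPEC =====
def Spec_label_tweets (tokens_list : List (List String)) (tweets_list : List String) (afinn : List (String × Int)) (out : List Int) : Prop := out = label_tweets_alt tokens_list tweets_list afinn
instance (tokens_list : List (List String)) (tweets_list : List String) (afinn : List (String × Int)) (out : List Int) : Decidable (Spec_label_tweets tokens_list tweets_list afinn out) := by unfold Spec_label_tweets; infer_instance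

-- ===== CLAIM (what is proved, stated in full; the proofs are below) =====
def Claim_equal_label_tweets : Prop := ∀ (tokens_list : List (List String)) (tweets_list : List String) (afinn : List (String × Int)), Dom_label_tweets tokens_list tweets_list afinn → Spec_label_tweets tokens_list tweets_list afinn (label_tweets tokens_list tweets_list afinn)

-- ===== LEMMAS AND PROOFS =====

-- reference quantity used only by the proofs: the net AFINN score of a token list
def net (tokens : List String) (d : PySem.Dict String Int) : Int :=
  (tokens.map (fun t => (d.get? t).getD 0)).sum

-- pos - neg of A's helper equals the net score
theorem sent_sub_eq_net (terms : List String) (afinn : PySem.Dict String Int) :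
    (afinn_sentimentA terms afinn).1 - (afinn_sentimentA terms afinn).2 = net terms afinn := by
  suffices h : ∀ (pn : Int × Int),
      (terms.foldl (fun pn t =>
          match afinn.get? t with
          | some v => if v > 0 then (pn.1 + v, pn.2) else (pn.1, pn.2 + (-1) * v)
          | none => pn) pn).1
      - (terms.foldl (fun pn t =>
          match afinn.get? t with
          | some v => if v > 0 then (pn.1 + v, pn.2) else (pn.1, pn.2 + (-1) * v)
          | none => pn) pn).2
      = pn.1 - pn.2 + net terms afinn by
    simpa [afinn_sentimentA] using h (0, 0)
  induction terms with
  | nil => intro pn; simp [net]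
  | cons t ts ih =>
    intro pn
    simp only [List.foldl_cons]
    have hnet : net (t :: ts) afinn = (afinn.get? t).getD 0 + net ts afinn := by
      simp [net]
    cases hv : afinn.get? t with
    | none => rw [ih pn]; simp [hnet, hv]
    | some v =>
      by_cases hp : v > 0
      · simp only [hp, if_pos]
        rw [ih (pn.1 + v, pn.2)]; simp [hnet, hv]; ring
      · simp only [hp, if_neg, not_false_iff]
        rw [ih (pn.1, pn.2 + (-1) * v)]; simp [hnet, hv]; ring

-- the indicator sum over the deduplicated lexicon is exactly the dict lookup;
-- generalised over the 'seen' accumulator of lexGo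
theorem lexGo_indicator (t : String) :
    ∀ (l : List (String × Int)) (seen : List String),
      ((lexGo l seen).map (fun p => if p.1 = t then p.2 else 0)).sum
        = if t ∈ seen then 0 else ((PySem.Dict.mk l).get? t).getD 0 := by
  intro l
  induction l with
  | nil => intro seen; simp [lexGo, PySem.Dict.get?]
  | cons p rest ih =>
    intro seen
    rw [lexGo]
    by_cases hp : p.1 ∈ seen
    · rw [if_pos hp, ih seen]
      by_cases ht : t ∈ seen
      · simp [ht]
      · have hne : ¬ p.1 = t := fun h => ht (h ▸ hp)
        rw [if_neg ht, if_neg ht, PySem.Dict.get?_mk_cons, if_neg (by simpa using hne)]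
    · rw [if_neg hp]
      simp only [List.map_cons, List.sum_cons]
      by_cases ht : t ∈ seen
      · have hne : ¬ p.1 = t := fun h => hp (h ▸ ht)
        rw [ih (p.1 :: seen), if_pos (List.mem_cons_of_mem _ ht), if_pos ht, if_neg hne]
        simp
      · by_cases he : p.1 = t
        · rw [ih (p.1 :: seen), if_pos he, if_pos (by simp [he]), if_neg ht,
            PySem.Dict.get?_mk_cons, if_pos (by simpa using he)]
          simp
        · rw [ih (p.1 :: seen), if_neg he,
            if_neg (by simp only [List.mem_cons]; rintro (h | h); exacts [he h.symm, ht h]),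
            if_neg ht, PySem.Dict.get?_mk_cons, if_neg (by simpa using he)]
          simp

theorem lex_indicator (t : String) (l : List (String × Int)) :
    ((lexItems l).map (fun p => if p.1 = t then p.2 else 0)).sum
      = ((PySem.Dict.mk l).get? t).getD 0 := by
  rw [lexItems, lexGo_indicator t l []]
  simp

-- the lexicon scan weighted by token counts computes the net score
theorem lex_total_eq_net (tokens : List String) (afinn : List (String × Int)) :
    ((lexItems afinn).map (fun p => p.2 * ((tokens.count p.1 : Int)))).sum
      = net tokens (PySem.Dict.mk afinn) := by
  induction tokens with
  | nil => simp [net]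
  | cons t ts ih =>
    have hsplit : ∀ p : String × Int,
        p.2 * (((t :: ts).count p.1 : Int))
          = p.2 * ((ts.count p.1 : Int)) + (if p.1 = t then p.2 else 0) := by
      intro p
      by_cases h : p.1 = t
      · simp [h, List.count_cons_self]; ring
      · rw [List.count_cons_of_ne (fun hh => h hh.symm)]; simp [h]
    calc ((lexItems afinn).map (fun p => p.2 * (((t :: ts).count p.1 : Int)))).sum
        = ((lexItems afinn).map (fun p => p.2 * ((ts.count p.1 : Int)) + (if p.1 = t then p.2 else 0))).sum := by
          exact congrArg List.sum (List.map_congr_left (fun p _ => hsplit p))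
      _ = ((lexItems afinn).map (fun p => p.2 * ((ts.count p.1 : Int)))).sum
          + ((lexItems afinn).map (fun p => if p.1 = t then p.2 else 0)).sum := by
          exact PySem.List.sum_map_add_int _ _ _
      _ = net ts (PySem.Dict.mk afinn) + ((PySem.Dict.mk afinn).get? t).getD 0 := by
          rw [ih, lex_indicator]
      _ = net (t :: ts) (PySem.Dict.mk afinn) := by simp [net]; ring

-- B's per-tweet total (count dict + lexicon scan) equals the net score
theorem alt_total_eq_net (tokens : List String) (afinn : List (String × Int)) :
    (lexItems afinn).foldl
      (fun s p => s + p.2 * ((tokens.foldl (fun d t => d.insert t (d.getD t 0 + 1)) PySem.Dict.empty).getD p.1 0)) 0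
      = net tokens (PySem.Dict.mk afinn) := by
  have hcnt : ∀ w, (tokens.foldl (fun d t => d.insert t (d.getD t 0 + 1)) PySem.Dict.empty).getD w 0
      = ((tokens.count w : Int)) := by
    intro w
    rw [PySem.Dict.getD_foldl_insert_add_one]
    simp
  rw [PySem.List.foldl_add]
  rw [List.map_congr_left (fun p _ => by rw [hcnt p.1])]
  simpa using lex_total_eq_net tokens afinn

-- each iteration of A's loop appends exactly B's label, regardless of the carried label
theorem label_step (tokens : List String) (afinn : PySem.Dict String Int) (old : Int) :
    (if (afinn_sentimentA tokens afinn).1 ≥ (afinn_sentimentA tokens afinn).2 then (1 : Int)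
     else if (afinn_sentimentA tokens afinn).2 > (afinn_sentimentA tokens afinn).1 then 0 else old)
    = (if net tokens afinn ≥ 0 then 1 else 0) := by
  have h := sent_sub_eq_net tokens afinn
  by_cases hge : (afinn_sentimentA tokens afinn).1 ≥ (afinn_sentimentA tokens afinn).2
  · rw [if_pos hge, if_pos (by omega)]
  · rw [if_neg hge, if_pos (by omega), if_neg (by omega)]

-- ===== VERDICT (by name: the statement is the Claim_ definition above) =====
theorem label_tweets_spec : Claim_equal_label_tweets := by
  intro tokens_list tweets_list afinn _
  unfold Spec_label_tweets label_tweets label_tweets_alt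
  suffices h : ∀ (L : List (List String)) (lab : Int) (ys : List Int),
      (L.foldl
        (fun (st : Int × List Int) tokens =>
          let pn := afinn_sentimentA tokens (PySem.Dict.mk afinn)
          let label : Int := if pn.1 ≥ pn.2 then 1 else if pn.2 > pn.1 then 0 else st.1
          (label, st.2 ++ [label])) (lab, ys)).2
      = L.foldl
          (fun (acc : List Int) tokens =>
            let counts := tokens.foldl (fun d t => d.insert t (d.getD t 0 + 1)) PySem.Dict.empty
            let total : Int := (lexItems afinn).foldl (fun s p => s + p.2 * counts.getD p.1 0) 0
            acc ++ [if total ≥ 0 then (1 : Int) else 0])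
          ys by
    simpa using h tokens_list (-1) []
  intro L
  induction L with
  | nil => intro lab ys; simp
  | cons tokens rest ih =>
    intro lab ys
    simp only [List.foldl_cons]
    rw [label_step tokens (PySem.Dict.mk afinn) lab, ← alt_total_eq_net tokens afinn, ih]
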